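-- pv_equiv track=rewrite | github.com/ayukyo/alltoolkit | Python/look_and_say_utils/mod.py | is_valid_look_and_say_term
-- ===== SOURCE A (Python) =====
-- def is_valid_look_and_say_term(term: str) -> bool:
--     """
--     检查字符串是否可能是外观数列中的某一项
--
--     规则：
--     1. 只包含数字
--     2. 不能以数字4及以上开头（理论上外观数列只出现1、2、3）
--     3. 连续相同数字的描述必须正确
--
--     Args:
--         term: 要检查的项
--
--     Returns:
--         是否有效
--
--     Examples:
--         >>> LookAndSayUtils.is_valid_look_and_say_term("1211")
--         True
--         >>> LookAndSayUtils.is_valid_look_and_say_term("12345")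
--         False
--     """
--     if not term:
--         return False
--
--     # 检查是否只包含数字
--     if not term.isdigit():
--         return False
--
--     # 外观数列中不会出现连续4个或更多相同数字
--     count = 1
--     for i in range(1, len(term)):
--         if term[i] == term[i - 1]:
--             count += 1
--             if count > 3:
--                 return False
--         else:
--             count = 1
--
--     return True
-- ===== SOURCE B (Python) =====
-- def is_valid_look_and_say_term(term: str) -> bool:
--     if not term or not term.isdigit():
--         return False
--     # Stateless sliding-window check: no four consecutive equal characters anywhere.
--     return not any(a == b == c == d for a, b, c, d in zip(term, term[1:], term[2:], term[3:]))
-- ===== Notes on version B (the rewrite author's own statement) =====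
-- stated objective: alternative
-- what changed: Drops A's maintained run counter with early return entirely: B checks, statelessly, that no length-4 window of consecutive characters is constant, via zip over the string and its three shifts.
import Mathlib
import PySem

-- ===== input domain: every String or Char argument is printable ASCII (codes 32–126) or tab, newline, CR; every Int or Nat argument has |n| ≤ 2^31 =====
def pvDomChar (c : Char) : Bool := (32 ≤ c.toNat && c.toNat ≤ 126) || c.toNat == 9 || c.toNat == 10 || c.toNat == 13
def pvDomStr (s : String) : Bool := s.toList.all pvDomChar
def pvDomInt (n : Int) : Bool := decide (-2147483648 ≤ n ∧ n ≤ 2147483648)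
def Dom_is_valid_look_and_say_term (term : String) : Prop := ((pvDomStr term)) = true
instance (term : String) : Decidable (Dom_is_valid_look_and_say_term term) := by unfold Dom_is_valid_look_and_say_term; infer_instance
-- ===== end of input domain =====

-- B drops A's run counter with early return: it checks, statelessly, that no window of
-- four consecutive characters is constant (alternative decomposition; same O(n) cost).

-- ===== PORT A =====
-- A's for-loop over i in range(1, len(term)): state = (previous char, current run count),
-- early 'return False' when the count exceeds 3.
def pvALoop (prev : Char) (count : Nat) : List Char → Bool
  | [] => true
  | c :: rest =>
    if c == prev then
      if count + 1 > 3 then false else pvALoop c (count + 1) rest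
    else pvALoop c 1 rest

def is_valid_look_and_say_term (term : String) : Bool :=
  if term.toList.isEmpty then false
  else if !(PySem.Str.strIsdigit term) then false
  else
    match term.toList with
    | [] => true
    | c :: rest => pvALoop c 1 rest

-- ===== PORT B =====
-- 'any(a == b == c == d for a, b, c, d in zip(term, term[1:], term[2:], term[3:]))':
-- the zip of the string with its three shifts enumerates exactly the length-4 windows
-- of consecutive characters, so this scans those windows in order.
def pvHasQuad : List Char → Bool
  | a :: b :: c :: d :: rest => (a == b && b == c && c == d) || pvHasQuad (b :: c :: d :: rest)
  | _ => false

def is_valid_look_and_say_term_alt (term : String) : Bool :=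
  if term.toList.isEmpty || !(PySem.Str.strIsdigit term) then false
  else !pvHasQuad term.toList

-- ===== PRECONDITION & SPEC =====
def Spec_is_valid_look_and_say_term (term : String) (out : Bool) : Prop := out = is_valid_look_and_say_term_alt term
instance (term : String) (out : Bool) : Decidable (Spec_is_valid_look_and_say_term term out) := by unfold Spec_is_valid_look_and_say_term; infer_instance

-- ===== CLAIM (what is proved, stated in full; the proofs are below) =====
def Claim_equal_is_valid_look_and_say_term : Prop := ∀ (term : String), Dom_is_valid_look_and_say_term term → Spec_is_valid_look_and_say_term term (is_valid_look_and_say_term term)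

-- ===== LEMMAS AND PROOFS =====

-- Prepending one character distinct from the head adds no constant 4-window.
theorem pvHasQuad_cons1 (c d : Char) (h : (c == d) = false) (ds : List Char) :
    pvHasQuad (c :: d :: ds) = pvHasQuad (d :: ds) := by
  match ds with
  | [] => rfl
  | [e] => rfl
  | e :: f :: fs => simp [pvHasQuad, h]

theorem pvHasQuad_cons2 (c d : Char) (h : (c == d) = false) (ds : List Char) :
    pvHasQuad (c :: c :: d :: ds) = pvHasQuad (d :: ds) := by
  match ds with
  | [] => rfl
  | e :: es =>
    rw [show pvHasQuad (c :: c :: d :: e :: es)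
          = ((c == c && c == d && d == e) || pvHasQuad (c :: d :: e :: es)) from rfl]
    rw [pvHasQuad_cons1 c d h]
    simp [h]

theorem pvHasQuad_cons3 (c d : Char) (h : (c == d) = false) (ds : List Char) :
    pvHasQuad (c :: c :: c :: d :: ds) = pvHasQuad (d :: ds) := by
  rw [show pvHasQuad (c :: c :: c :: d :: ds)
        = ((c == c && c == c && c == d) || pvHasQuad (c :: c :: d :: ds)) from rfl]
  rw [pvHasQuad_cons2 c d h]
  simp [h]

-- A's scan with run count n (the last n characters seen were all c) decides exactly
-- whether replicate n c ++ l contains a constant 4-window.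
theorem pvALoop_eq_quad (l : List Char) : ∀ (c : Char) (n : Nat), 1 ≤ n → n ≤ 3 →
    pvALoop c n l = !pvHasQuad (List.replicate n c ++ l) := by
  induction l with
  | nil =>
    intro c n h1 h3
    interval_cases n <;> simp [pvALoop, pvHasQuad, List.replicate]
  | cons d ds ih =>
    intro c n h1 h3
    by_cases hdc : (d == c) = true
    · have hd : d = c := eq_of_beq hdc
      subst hd
      rw [show pvALoop d n (d :: ds) = (if n + 1 > 3 then false else pvALoop d (n + 1) ds) by
        simp [pvALoop]]
      by_cases h4 : n + 1 > 3
      · have hn : n = 3 := by omega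
        subst hn
        rw [if_pos h4]
        simp [List.replicate, pvHasQuad]
      · rw [if_neg h4, ih d (n + 1) (by omega) (by omega)]
        congr 1
        rw [show List.replicate n d ++ d :: ds = List.replicate (n + 1) d ++ ds by
          rw [List.replicate_succ']; simp]
    · have hdc' : (d == c) = false := by simpa using hdc
      have hne : c ≠ d := fun he => by simp [he] at hdc'
      have hcd : (c == d) = false := by simp [hne]
      rw [show pvALoop c n (d :: ds) = pvALoop d 1 ds by simp [pvALoop, hdc']]
      rw [ih d 1 (by omega) (by omega)]
      congr 1
      interval_cases n
      · exact (pvHasQuad_cons1 c d hcd ds).symm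
      · exact (pvHasQuad_cons2 c d hcd ds).symm
      · exact (pvHasQuad_cons3 c d hcd ds).symm

-- ===== VERDICT (by name: the statement is the Claim_ definition above) =====
theorem is_valid_look_and_say_term_spec : Claim_equal_is_valid_look_and_say_term := by
  intro term _
  unfold Spec_is_valid_look_and_say_term is_valid_look_and_say_term is_valid_look_and_say_term_alt
  cases h : term.toList with
  | nil => simp [h]
  | cons c rest =>
    by_cases hd : PySem.Str.strIsdigit term
    · simp only [List.isEmpty_cons, hd, Bool.not_true, Bool.or_false]
      rw [if_neg (by simp)]
      rw [pvALoop_eq_quad rest c 1 (by omega) (by omega)]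
      simp
    · have hc : PySem.Chars.strIsdigit (c :: rest) = false := by
        rw [← h]; simpa using hd
      simp [h, hc]
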